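-- pv_equiv track=rewrite | github.com/OnYyon/EGE | task15/types/task4.py | check
-- ===== SOURCE A (Python) =====
-- def check(a):
--     for x in range(1, 100500):
--         x_2 = x % 2 == 0
--         x_3 = x % 3 == 0
--         x_a = x + a >= 80
--         f = (x_2 <= (not x_3)) or x_a
--         if f != 1:
--             return False
--     return True
-- ===== SOURCE B (Python) =====
-- def check(a):
--     # The predicate fails only at multiples of 6 (x_2 and x_3) with x + a < 80;
--     # the smallest such x in range(1, 100500) is 6, so the loop succeeds iff 6 + a >= 80.
--     return a >= 74
-- ===== Notes on version B (the rewrite author's own statement) =====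
-- stated objective: faster
-- what changed: Replaced the brute-force loop over range(1, 100500) by the one-line closed form a >= 74: the predicate can only fail at multiples of 6, and the smallest one in range is x = 6.
import Mathlib
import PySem

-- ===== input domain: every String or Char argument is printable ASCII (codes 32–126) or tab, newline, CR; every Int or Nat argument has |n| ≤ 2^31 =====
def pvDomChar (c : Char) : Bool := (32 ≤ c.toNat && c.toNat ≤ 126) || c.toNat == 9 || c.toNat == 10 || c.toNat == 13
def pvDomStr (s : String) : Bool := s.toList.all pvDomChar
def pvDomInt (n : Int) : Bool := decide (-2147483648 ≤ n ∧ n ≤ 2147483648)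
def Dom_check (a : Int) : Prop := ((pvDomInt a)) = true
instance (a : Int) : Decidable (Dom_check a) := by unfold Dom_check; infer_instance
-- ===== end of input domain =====

-- B replaces A's brute-force loop by the closed form a ≥ 74 (objective: faster — no loop).

-- ===== PORT A =====
-- loop body: f = (x_2 <= (not x_3)) or x_a   ('b1 <= b2' on bools is '!b1 || b2')
def checkBody (a x : Int) : Bool :=
  let x_2 := decide (PySem.Int.mod x 2 = 0)
  let x_3 := decide (PySem.Int.mod x 3 = 0)
  let x_a := decide (x + a ≥ 80)
  (!x_2 || !x_3) || x_a

-- the for-loop with early 'return False'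
def checkLoop (a : Int) : List Int → Bool
  | [] => true
  | x :: rest => if checkBody a x ≠ true then false else checkLoop a rest

def check (a : Int) : Bool := checkLoop a (PySem.List.pyRange 1 100500 1)

-- ===== PORT B =====
def check_alt (a : Int) : Bool := decide (a ≥ 74)

-- ===== PRECONDITION & SPEC =====
def Spec_check (a : Int) (out : Bool) : Prop := out = check_alt a
instance (a : Int) (out : Bool) : Decidable (Spec_check a out) := by unfold Spec_check; infer_instance

-- ===== CLAIM (what is proved, stated in full; the proofs are below) =====
def Claim_equal_check : Prop := ∀ (a : Int), Dom_check a → Spec_check a (check a)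

-- ===== LEMMAS AND PROOFS =====

theorem checkLoop_eq_all (a : Int) (l : List Int) : checkLoop a l = l.all (checkBody a) := by
  induction l with
  | nil => rfl
  | cons x rest ih =>
    simp only [checkLoop, List.all_cons, ih]
    by_cases h : checkBody a x = true <;> simp [h]

theorem checkBody_iff (a x : Int) :
    checkBody a x = true ↔ (¬ (x % 2 = 0 ∧ x % 3 = 0) ∨ x + a ≥ 80) := by
  simp [checkBody, PySem.Int.mod, Int.fmod_eq_emod]
  omega

-- ===== VERDICT (by name: the statement is the Claim_ definition above) =====
theorem check_spec : Claim_equal_check := by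
  intro a _
  unfold Spec_check check check_alt
  rw [checkLoop_eq_all]
  by_cases h : a ≥ 74
  · simp only [h, decide_true]
    rw [List.all_eq_true]
    intro x hx
    rw [PySem.List.mem_pyRange_one] at hx
    rw [checkBody_iff]
    by_cases h6 : x % 2 = 0 ∧ x % 3 = 0
    · right; omega
    · left; exact h6
  · simp only [h, decide_false]
    rw [List.all_eq_false]
    refine ⟨6, ?_, ?_⟩
    · rw [PySem.List.mem_pyRange_one]; omega
    · rw [checkBody_iff]
      push_neg
      exact ⟨⟨by decide, by decide⟩, by omega⟩
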